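-- pv_equiv track=rewrite | github.com/gencf/Python | 6.7.py | ball_game
-- ===== SOURCE A (Python) =====
-- def ball_game(l, n):
--     index = 0
--     for i in range(n):
--         try:
--             next = l[index]
--             index = next
--         except:
--             return index
--     return index
-- ===== SOURCE B (Python) =====
-- def ball_game(l, n):
--     # Rho-style cycle detection: remember the step at which each index was first
--     # seen; on revisiting an index, jump the remaining steps modulo the cycle length.
--     seen = {}
--     index = 0
--     step = 0
--     m = len(l)
--     while step < n:
--         if index in seen:
--             cycle = step - seen[index]
--             for _ in range((n - step) % cycle):
--                 index = l[index]
--             return index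
--         seen[index] = step
--         if -m <= index < m:
--             index = l[index]
--             step += 1
--         else:
--             return index
--     return index
-- ===== Notes on version B (the rewrite author's own statement) =====
-- stated objective: alternative
-- what changed: Replaces the n-step pointer walk with rho-style cycle detection: record the first step each index is seen, and on a revisit jump the remaining steps modulo the cycle length, so at most O(len(l)) chain steps are taken regardless of n.
import Mathlib
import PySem

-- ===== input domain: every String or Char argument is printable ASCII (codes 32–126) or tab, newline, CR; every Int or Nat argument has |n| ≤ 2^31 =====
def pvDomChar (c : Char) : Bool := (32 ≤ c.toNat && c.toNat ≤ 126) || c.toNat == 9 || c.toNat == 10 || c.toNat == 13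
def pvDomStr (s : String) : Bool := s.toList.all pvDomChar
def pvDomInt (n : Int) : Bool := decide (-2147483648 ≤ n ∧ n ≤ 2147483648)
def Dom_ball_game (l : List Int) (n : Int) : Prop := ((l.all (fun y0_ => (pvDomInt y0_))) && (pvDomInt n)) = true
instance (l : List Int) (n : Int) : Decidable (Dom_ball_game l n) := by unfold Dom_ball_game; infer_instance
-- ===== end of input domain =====

-- B replaces A's n-step pointer walk by rho-style cycle detection (a different algorithm: steps taken are bounded by the number of distinct indices, with a modulo jump around the cycle).

-- ===== PORT A =====
-- for i in range(n): try: index = l[index] except: return index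
def ballGameGoA (l : List Int) : Nat → Int → Int
  | 0, index => index
  | fuel + 1, index =>
    match PySem.List.pyGet? l index with
    | some next => ballGameGoA l fuel next
    | none => index      -- IndexError caught by 'except:': return index

def ball_game (l : List Int) (n : Int) : Int :=
  ballGameGoA l n.toNat 0

-- ===== PORT B =====
-- for _ in range((n - step) % cycle): index = l[index]
-- (every lookup on this path succeeded earlier in the walk, so the default of getD is never used)
def ballGameRem (l : List Int) : Nat → Int → Int
  | 0, index => index
  | r + 1, index => ballGameRem l r ((PySem.List.pyGet? l index).getD index)

-- the while loop of Source B; fuel = n - step, so the condition 'step < n' is fuel ≠ 0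
def ballGameGoB (l : List Int) (n : Nat) : Nat → PySem.Dict Int Nat → Int → Nat → Int
  | 0, _, index, _ => index
  | fuel + 1, seen, index, step =>
    match PySem.Dict.get? seen index with
    | some s =>
      let cycle := step - s
      ballGameRem l ((n - step) % cycle) index
    | none =>
      if -(l.length : Int) ≤ index ∧ index < l.length then
        ballGameGoB l n fuel (seen.insert index step) ((PySem.List.pyGet? l index).getD index) (step + 1)
      else
        index

def ball_game_alt (l : List Int) (n : Int) : Int :=
  ballGameGoB l n.toNat n.toNat PySem.Dict.empty 0 0

-- ===== PRECONDITION & SPEC =====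
def Spec_ball_game (l : List Int) (n : Int) (out : Int) : Prop := out = ball_game_alt l n
instance (l : List Int) (n : Int) (out : Int) : Decidable (Spec_ball_game l n out) := by unfold Spec_ball_game; infer_instance

-- ===== CLAIM (what is proved, stated in full; the proofs are below) =====
def Claim_equal_ball_game : Prop := ∀ (l : List Int) (n : Int), Dom_ball_game l n → Spec_ball_game l n (ball_game l n)

-- ===== LEMMAS AND PROOFS =====

-- exact partial iteration of the step function (none = the walk got stuck before k steps)
def ballIter (l : List Int) : Nat → Int → Option Int
  | 0, i => some i
  | k + 1, i =>
    match PySem.List.pyGet? l i with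
    | some v => ballIter l k v
    | none => none

theorem ballIter_add (l : List Int) (a b : Nat) (i : Int) :
    ballIter l (a + b) i = (ballIter l a i).bind (ballIter l b) := by
  induction a generalizing i with
  | zero => simp [ballIter]
  | succ a ih =>
    have h : a + 1 + b = (a + b) + 1 := by omega
    rw [h]
    simp only [ballIter]
    cases PySem.List.pyGet? l i with
    | none => rfl
    | some v => exact ih v

theorem goA_of_iter_some (l : List Int) (k : Nat) (i j : Int)
    (h : ballIter l k i = some j) : ballGameGoA l k i = j := by
  induction k generalizing i with
  | zero => simpa [ballIter, ballGameGoA] using h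
  | succ k ih =>
    simp only [ballIter, ballGameGoA] at h ⊢
    cases hv : PySem.List.pyGet? l i with
    | none => simp [hv] at h
    | some v => rw [hv] at h; exact ih v h

theorem ballRem_of_iter_some (l : List Int) (k : Nat) (i j : Int)
    (h : ballIter l k i = some j) : ballGameRem l k i = j := by
  induction k generalizing i with
  | zero => simpa [ballIter, ballGameRem] using h
  | succ k ih =>
    simp only [ballIter, ballGameRem] at h ⊢
    cases hv : PySem.List.pyGet? l i with
    | none => simp [hv] at h
    | some v => rw [hv] at h; simp only [Option.getD_some]; exact ih v h

-- on a cycle of length c the iteration is total and periodic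
theorem ballIter_mod (l : List Int) (c : Nat) (i : Int) (hc : 0 < c)
    (hcyc : ballIter l c i = some i) (k : Nat) :
    ballIter l k i = ballIter l (k % c) i := by
  induction k using Nat.strong_induction_on with
  | _ k ih =>
    by_cases hk : k < c
    · rw [Nat.mod_eq_of_lt hk]
    · rw [not_lt] at hk
      calc ballIter l k i = ballIter l (c + (k - c)) i := by rw [Nat.add_sub_cancel' hk]
        _ = (ballIter l c i).bind (ballIter l (k - c)) := ballIter_add l c (k - c) i
        _ = ballIter l (k - c) i := by rw [hcyc, Option.bind_some]
        _ = ballIter l ((k - c) % c) i := ih (k - c) (by omega)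
        _ = ballIter l (k % c) i := by rw [Nat.mod_eq_sub_mod hk]

theorem ballIter_prefix (l : List Int) (a b : Nat) (i j : Int) (hab : a ≤ b)
    (h : ballIter l b i = some j) : ∃ j', ballIter l a i = some j' := by
  have hdecomp : b = a + (b - a) := by omega
  rw [hdecomp, ballIter_add] at h
  cases ha : ballIter l a i with
  | none => rw [ha] at h; simp at h
  | some j' => exact ⟨j', rfl⟩

-- the invariant of B's while loop: every recorded index was seen strictly earlier,
-- and walking from it to the current step never got stuck, landing at the current index
def BallInv (l : List Int) (seen : PySem.Dict Int Nat) (index : Int) (step : Nat) : Prop :=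
  ∀ k s, seen.get? k = some s → s < step ∧ ballIter l (step - s) k = some index

theorem ballGameGoB_eq_goA (l : List Int) (n fuel : Nat)
    (seen : PySem.Dict Int Nat) (index : Int) (step : Nat)
    (hfuel : step + fuel = n) (hinv : BallInv l seen index step) :
    ballGameGoB l n fuel seen index step = ballGameGoA l fuel index := by
  induction fuel generalizing seen index step with
  | zero => simp [ballGameGoB, ballGameGoA]
  | succ fuel ih =>
    simp only [ballGameGoB]
    cases hs : PySem.Dict.get? seen index with
    | some s =>
      -- cycle found: index was the state at step s and is the state again at step
      obtain ⟨hlt, hcyc⟩ := hinv index s hs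
      have hc0 : 0 < step - s := by omega
      have hmod := ballIter_mod l (step - s) index hc0 hcyc (fuel + 1)
      have hrem_lt : (fuel + 1) % (step - s) < step - s := Nat.mod_lt _ hc0
      obtain ⟨j, hj⟩ := ballIter_prefix l ((fuel + 1) % (step - s)) (step - s) index index
        (le_of_lt hrem_lt) hcyc
      have hiter : ballIter l (fuel + 1) index = some j := by rw [hmod]; exact hj
      have hnms : (n - step) % (step - s) = (fuel + 1) % (step - s) := by
        congr 1; omega
      show ballGameRem l ((n - step) % (step - s)) index = ballGameGoA l (fuel + 1) index
      rw [hnms, ballRem_of_iter_some l _ index j hj,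
        goA_of_iter_some l (fuel + 1) index j hiter]
    | none =>
      by_cases hrange : -(l.length : Int) ≤ index ∧ index < l.length
      · rw [if_pos hrange]
        have hin : PySem.Raise.InRange l.length index := ⟨hrange.1, hrange.2⟩
        obtain ⟨v, hv⟩ : ∃ v, PySem.List.pyGet? l index = some v := by
          cases hg : PySem.List.pyGet? l index with
          | none => exact absurd ((PySem.List.pyGet?_eq_none_iff l index).mp hg) (not_not_intro hin)
          | some v => exact ⟨v, rfl⟩
        have hgoA : ballGameGoA l (fuel + 1) index = ballGameGoA l fuel v := by
          simp [ballGameGoA, hv]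
        rw [hgoA, hv, Option.getD_some]
        apply ih (seen.insert index step) v (step + 1) (by omega)
        -- invariant preserved
        intro k s hks
        rw [PySem.Dict.get?_insert] at hks
        by_cases hk : k = index
        · rw [if_pos hk] at hks
          obtain rfl := Option.some.inj hks
          subst hk
          refine ⟨by omega, ?_⟩
          have : step + 1 - step = 1 := by omega
          rw [this]
          simp [ballIter, hv]
        · rw [if_neg hk] at hks
          obtain ⟨hlt, hit⟩ := hinv k s hks
          refine ⟨by omega, ?_⟩
          have hd : step + 1 - s = (step - s) + 1 := by omega
          rw [hd, ballIter_add, hit, Option.bind_some]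
          simp [ballIter, hv]
      · rw [if_neg hrange]
        -- index out of range: A's lookup raises too, both return index
        have hnone : PySem.List.pyGet? l index = none := by
          rw [PySem.List.pyGet?_eq_none_iff l index]
          intro ⟨h1, h2⟩
          exact hrange ⟨h1, h2⟩
        simp [ballGameGoA, hnone]

-- ===== VERDICT (by name: the statement is the Claim_ definition above) =====
theorem ball_game_spec : Claim_equal_ball_game := by
  intro l n _
  show ball_game l n = ball_game_alt l n
  unfold ball_game ball_game_alt
  rw [ballGameGoB_eq_goA l n.toNat n.toNat PySem.Dict.empty 0 0 (by omega)]
  intro k s hks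
  simp [PySem.Dict.get?_empty] at hks
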